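-- pv_equiv track=rewrite | github.com/AaronHowell/S-DES_with_PyDracula_GUI | gui.py | divide_task_16bit
-- ===== SOURCE A (Python) =====
-- def divide_task_16bit(num_segments):
--     start = 0
--     end = 65535
--     if num_segments <= 0:
--         return []
--     segment_size = (end - start) // num_segments
--     segments = []
--     current_start = start
--     for _ in range(num_segments):
--         current_end = current_start + segment_size
--         # 确保最后一个段不超出范围的终点
--         if _ == num_segments - 1:
--             current_end = end
--         # 将起点和终点转换为8位二进制字符串
--         start_binary = format(current_start, '016b')
--         end_binary = format(current_end, '016b')
--         segments.append((start_binary, end_binary))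
--         current_start = current_end + 1
--     return segments
-- ===== SOURCE B (Python) =====
-- def divide_task_16bit(num_segments):
--     if num_segments <= 0:
--         return []
--     step = 65535 // num_segments + 1
--     # boundary list: starts of all segments, plus a sentinel 65536 closing the last one;
--     # each segment's end is the next boundary minus one (no last-segment clamp branch needed)
--     bounds = list(range(0, num_segments * step, step)) + [65536]
--     return [(format(s, '016b'), format(e - 1, '016b'))
--             for s, e in zip(bounds, bounds[1:])]
-- ===== Notes on version B (the rewrite author's own statement) =====
-- stated objective: alternative
-- what changed: B builds the list of segment-start boundaries (a stepped range plus a 65536 sentinel) and zips it with its own tail, so each segment is a pair of consecutive boundaries and the last-segment clamp branch disappears; A threads a running current_start through a loop with an explicit last-iteration clamp.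
import Mathlib
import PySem

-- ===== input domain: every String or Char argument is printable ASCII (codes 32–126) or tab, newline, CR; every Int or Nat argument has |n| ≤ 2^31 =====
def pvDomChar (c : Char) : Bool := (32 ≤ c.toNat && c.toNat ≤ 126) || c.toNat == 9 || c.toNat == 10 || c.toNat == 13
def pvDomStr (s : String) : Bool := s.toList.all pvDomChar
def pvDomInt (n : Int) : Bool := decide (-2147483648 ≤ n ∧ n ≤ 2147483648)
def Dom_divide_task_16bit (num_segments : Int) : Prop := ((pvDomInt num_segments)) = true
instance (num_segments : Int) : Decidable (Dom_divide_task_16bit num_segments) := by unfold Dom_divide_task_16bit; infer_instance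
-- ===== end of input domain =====

-- B replaces A's running-cursor loop with a boundary list (stepped range + sentinel) zipped with its tail, eliminating the clamp branch (alternative decomposition, same cost).

-- ===== PORT A =====
-- format(x, '016b') for the nonnegative values arising here = binary digits zero-padded to width 16 = zfill (toBin x) 16 (exact).
def divide_task_16bit (num_segments : Int) : List (String × String) :=
  if num_segments ≤ 0 then []
  else
    let segment_size := PySem.Int.floordiv (65535 - 0) num_segments
    ((PySem.List.pyRange 0 num_segments 1).foldl
      (fun (st : Int × List (String × String)) i =>
        let current_end := st.1 + segment_size
        let current_end := if i = num_segments - 1 then (65535 : Int) else current_end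
        let start_binary := PySem.Str.zfill (PySem.Int.toBin st.1) 16
        let end_binary := PySem.Str.zfill (PySem.Int.toBin current_end) 16
        (current_end + 1, st.2 ++ [(start_binary, end_binary)]))
      ((0 : Int), ([] : List (String × String)))).2

-- ===== PORT B =====
def divide_task_16bit_alt (num_segments : Int) : List (String × String) :=
  if num_segments ≤ 0 then []
  else
    let step := PySem.Int.floordiv 65535 num_segments + 1
    let bounds := PySem.List.pyRange 0 (num_segments * step) step ++ [(65536 : Int)]
    (bounds.zip (PySem.List.slice bounds (some 1) none)).map
      (fun se => (PySem.Str.zfill (PySem.Int.toBin se.1) 16,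
                  PySem.Str.zfill (PySem.Int.toBin (se.2 - 1)) 16))

-- ===== PRECONDITION & SPEC =====
def Spec_divide_task_16bit (num_segments : Int) (out : List (String × String)) : Prop := out = divide_task_16bit_alt num_segments
instance (num_segments : Int) (out : List (String × String)) : Decidable (Spec_divide_task_16bit num_segments out) := by unfold Spec_divide_task_16bit; infer_instance

-- ===== CLAIM (what is proved, stated in full; the proofs are below) =====
def Claim_equal_divide_task_16bit : Prop := ∀ (num_segments : Int), Dom_divide_task_16bit num_segments → Spec_divide_task_16bit num_segments (divide_task_16bit num_segments)

-- ===== LEMMAS AND PROOFS =====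

-- Loop invariant for A: entering the iteration for index a, current_start equals a*(ss+1).
lemma divide_loop_eq (n ss : Int) : ∀ (k : Nat) (a : Int) (acc : List (String × String)),
    (n - a).toNat = k →
    ((PySem.List.pyRange a n 1).foldl
      (fun (st : Int × List (String × String)) i =>
        let current_end := st.1 + ss
        let current_end := if i = n - 1 then (65535 : Int) else current_end
        let start_binary := PySem.Str.zfill (PySem.Int.toBin st.1) 16
        let end_binary := PySem.Str.zfill (PySem.Int.toBin current_end) 16
        (current_end + 1, st.2 ++ [(start_binary, end_binary)]))
      (a * (ss + 1), acc)).2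
    = acc ++ (PySem.List.pyRange a n 1).map (fun i =>
        (PySem.Str.zfill (PySem.Int.toBin (i * (ss + 1))) 16,
         PySem.Str.zfill (PySem.Int.toBin
           (if i = n - 1 then (65535 : Int) else i * (ss + 1) + ss)) 16)) := by
  intro k
  induction k with
  | zero =>
    intro a acc hk
    have hna : n ≤ a := by omega
    rw [PySem.List.pyRange_one_eq_nil hna]
    simp
  | succ m ih =>
    intro a acc hk
    have hlt : a < n := by omega
    rw [PySem.List.pyRange_one_cons hlt]
    simp only [List.foldl_cons, List.map_cons]
    by_cases hlast : a = n - 1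
    · have hnil : PySem.List.pyRange (a + 1) n 1 = [] :=
        PySem.List.pyRange_one_eq_nil (by omega)
      rw [hnil]
      simp [hlast]
    · simp only [hlast, if_false]
      rw [show a * (ss + 1) + ss + 1 = (a + 1) * (ss + 1) from by ring,
        ih (a + 1) _ (by omega)]
      simp

-- The stepped range of B lists exactly the n segment starts step*k, k = 0..n-1.
lemma stepped_range_eq (n step : Int) (hn : 0 < n) (hs : 0 < step) :
    PySem.List.pyRange 0 (n * step) step
      = (List.range n.toNat).map (fun k : Nat => step * (k : Int)) := by
  have hpos : (0 : Int) < n * step := by positivity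
  have hdiv : (n * step - 0 + step - 1) / step = n := by
    have h1 : n * step - 0 + step - 1 = (step - 1) + n * step := by ring
    rw [h1, Int.add_mul_ediv_right _ _ (by omega : step ≠ 0),
      Int.ediv_eq_zero_of_lt (by omega) (by omega)]
    ring
  rw [PySem.List.pyRange_of_pos 0 (n * step) hs, if_pos hpos, hdiv]
  simp only [zero_add]

-- The boundary list, read at any index j ≤ N: the j-th start, or the sentinel at j = N.
lemma bounds_getElem (ss : Int) (N j : Nat) (hj : j < N + 1) :
    (((List.range N).map (fun k : Nat => (ss + 1) * (k : Int)) ++ [(65536 : Int)])[j]'(by simp; omega))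
      = if j < N then (ss + 1) * (j : Int) else 65536 := by
  by_cases hjN : j < N
  · rw [List.getElem_append_left (by simpa using hjN)]
    simp [hjN]
  · have hjeq : j = N := by omega
    subst hjeq
    rw [List.getElem_append_right (by simp)]
    simp

-- ===== VERDICT (by name: the statement is the Claim_ definition above) =====
theorem divide_task_16bit_spec : Claim_equal_divide_task_16bit := by
  intro n _
  unfold Spec_divide_task_16bit divide_task_16bit divide_task_16bit_alt
  by_cases h : n ≤ 0
  · simp [h]
  · simp only [if_neg h]
    have hn : 0 < n := by omega
    set ss := PySem.Int.floordiv 65535 n with hss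
    have hss0 : 0 ≤ ss := PySem.Int.floordiv_nonneg (by norm_num) (le_of_lt hn)
    have h0 : (65535 - 0 : Int) = 65535 := by norm_num
    rw [h0, ← hss]
    have hA := divide_loop_eq n ss (n - 0).toNat 0 [] rfl
    rw [zero_mul] at hA
    rw [hA, List.nil_append]
    -- rewrite both sides as maps over List.range n.toNat and compare pointwise
    rw [PySem.List.slice_from_one,
      stepped_range_eq n (ss + 1) hn (by omega), PySem.List.pyRange_one]
    simp only [sub_zero, zero_add, List.map_map]
    apply List.ext_getElem
    · simp [List.length_zip]
    · intro i h1 h2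
      have hiN : i < n.toNat := by
        simp only [List.length_map, List.length_range] at h1
        exact h1
      simp only [List.getElem_map, List.getElem_zip, List.getElem_tail,
        Function.comp_apply, List.getElem_range]
      rw [bounds_getElem ss n.toNat i (by omega),
        bounds_getElem ss n.toNat (i + 1) (by omega), if_pos hiN]
      by_cases hl : i + 1 < n.toNat
      · have hne : (i : Int) ≠ n - 1 := by
          intro hc
          omega
        rw [if_pos hl, if_neg hne]
        push_cast
        rw [show (ss + 1) * (i : Int) = (i : Int) * (ss + 1) from by ring,
          show (ss + 1) * ((i : Int) + 1) - 1 = (i : Int) * (ss + 1) + ss from by ring]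
      · have hieq : (i : Int) = n - 1 := by omega
        rw [if_neg hl, if_pos hieq]
        rw [show (65536 : Int) - 1 = 65535 from by norm_num,
          show (ss + 1) * (i : Int) = (i : Int) * (ss + 1) from by ring]
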